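-- pv_equiv track=rewrite | github.com/NahuelBarriga/TeoDeLaInfo | TP4/Tp4.py | metodoParidadCruzada
-- ===== SOURCE A (Python) =====
-- import copy
--
-- def metodoParidadCruzada(mensajes, N, M, flag):
--     N = int(N)
--     M = int(M)
--
--     if flag == 0:
--         paridades = copy.deepcopy(mensajes)
--     else:
--         mensajes_cortados = [fila[:M] for fila in mensajes[:N]]
--         paridades = [list(fila) for fila in mensajes_cortados]
--
--     for i in range(N):
--         cant = sum(paridades[i])
--         paridades[i].append(0 if cant % 2 == 0 else 1)
--
--     nueva_fila = [0] * (M + 1)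
--     for j in range(M + 1):
--         cant = sum(paridades[i][j] for i in range(N))
--         nueva_fila[j] = 0 if cant % 2 == 0 else 1
--
--     paridades.append(nueva_fila)
--
--     return paridades
-- ===== SOURCE B (Python) =====
-- def metodoParidadCruzada(mensajes, N, M, flag):
--     # One pass: maintain running column accumulators instead of re-scanning columns.
--     N = int(N)
--     M = int(M)
--
--     if flag == 0:
--         paridades = [list(fila) for fila in mensajes]
--     else:
--         paridades = [list(fila[:M]) for fila in mensajes[:N]]
--
--     cols = [0] * (M + 1)
--     for i in range(N):
--         fila = paridades[i]
--         fila.append(sum(fila) % 2)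
--         cols = [c + v for c, v in zip(cols, fila)]
--
--     paridades.append([c % 2 for c in cols])
--     return paridades
-- ===== Notes on version B (the rewrite author's own statement) =====
-- stated objective: alternative
-- what changed: Replaces A's second pass (for each of the M+1 columns, a re-scan summing paridades[i][j] over all N rows) by running column accumulators updated once per row inside the single row pass; the parity row is then cols % 2.
import Mathlib
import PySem

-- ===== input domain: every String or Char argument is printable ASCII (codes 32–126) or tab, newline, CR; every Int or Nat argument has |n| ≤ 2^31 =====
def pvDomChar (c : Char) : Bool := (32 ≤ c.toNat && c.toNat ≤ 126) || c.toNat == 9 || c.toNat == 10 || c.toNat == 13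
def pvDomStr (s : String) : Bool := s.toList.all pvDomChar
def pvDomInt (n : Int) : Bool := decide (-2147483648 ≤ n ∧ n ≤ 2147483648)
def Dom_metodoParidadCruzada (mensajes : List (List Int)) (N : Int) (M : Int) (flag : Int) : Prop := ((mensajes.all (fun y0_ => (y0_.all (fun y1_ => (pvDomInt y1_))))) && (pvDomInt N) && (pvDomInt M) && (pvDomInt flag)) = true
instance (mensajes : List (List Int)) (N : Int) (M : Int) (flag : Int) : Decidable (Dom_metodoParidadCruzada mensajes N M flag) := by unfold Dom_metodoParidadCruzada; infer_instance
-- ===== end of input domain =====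

-- B replaces A's second column-scanning pass by running column accumulators kept in the single row
-- pass (objective: alternative decomposition, same cost). Equivalence is about the RETURN value;
-- neither program mutates its argument.

-- ===== PORT A =====
-- copy.deepcopy(mensajes) on a list of lists of ints: in a pure setting, the same value
def pvCopyA (mensajes : List (List Int)) : List (List Int) := mensajes

def metodoParidadCruzada (mensajes : List (List Int)) (N : Int) (M : Int) (flag : Int) : List (List Int) :=
  let paridades0 : List (List Int) :=
    if flag == 0 then pvCopyA mensajes
    else
      let mensajes_cortados := (PySem.List.slice mensajes none (some N)).map
        (fun fila => PySem.List.slice fila none (some M))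
      mensajes_cortados.map (fun fila => fila)
  -- for i in range(N): cant = sum(paridades[i]); paridades[i].append(0 if cant % 2 == 0 else 1)
  let paridades := (PySem.List.pyRange 0 N 1).foldl
    (fun p i =>
      let cant := (PySem.List.pyGetD p i ([] : List Int)).sum
      PySem.List.pySetD p i
        (PySem.List.pyGetD p i ([] : List Int) ++ [if PySem.Int.mod cant 2 == 0 then (0 : Int) else 1]))
    paridades0
  -- nueva_fila[j] = parity of sum(paridades[i][j] for i in range(N)), j in range(M+1)
  let nueva_fila := (PySem.List.pyRange 0 (M + 1) 1).map
    (fun j =>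
      let cant := ((PySem.List.pyRange 0 N 1).map
        (fun i => PySem.List.pyGetD (PySem.List.pyGetD paridades i ([] : List Int)) j (0 : Int))).sum
      if PySem.Int.mod cant 2 == 0 then (0 : Int) else 1)
  paridades ++ [nueva_fila]

-- ===== PORT B =====
def metodoParidadCruzada_alt (mensajes : List (List Int)) (N : Int) (M : Int) (flag : Int) : List (List Int) :=
  let paridades0 : List (List Int) :=
    if flag == 0 then mensajes.map (fun fila => fila)
    else (PySem.List.slice mensajes none (some N)).map
      (fun fila => PySem.List.slice fila none (some M))
  -- single pass: append the row parity, then fold the row into the column accumulators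
  let st := (PySem.List.pyRange 0 N 1).foldl
    (fun (st : List (List Int) × List Int) i =>
      let fila := PySem.List.pyGetD st.1 i ([] : List Int)
      let fila := fila ++ [PySem.Int.mod fila.sum 2]
      (PySem.List.pySetD st.1 i fila, List.zipWith (fun c v => c + v) st.2 fila))
    (paridades0, List.replicate (M + 1).toNat (0 : Int))
  st.1 ++ [st.2.map (fun c => PySem.Int.mod c 2)]

-- ===== PRECONDITION & SPEC =====
-- Pre_ excludes exactly the inputs on which A raises IndexError: N exceeding the number of rows,
-- or one of the first N rows shorter than M (the column scan then indexes past the row's end).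
def Pre_metodoParidadCruzada (mensajes : List (List Int)) (N : Int) (M : Int) (flag : Int) : Prop :=
  N ≤ (mensajes.length : Int) ∧ ∀ fila ∈ mensajes.take N.toNat, M ≤ (fila.length : Int)
instance (mensajes : List (List Int)) (N : Int) (M : Int) (flag : Int) : Decidable (Pre_metodoParidadCruzada mensajes N M flag) := by unfold Pre_metodoParidadCruzada; infer_instance

def pvWitness_metodoParidadCruzada : List (List Int) × Int × Int × Int := ([[1, 0], [0, 1]], 2, 2, 0)

def Spec_metodoParidadCruzada (mensajes : List (List Int)) (N : Int) (M : Int) (flag : Int) (out : List (List Int)) : Prop := out = metodoParidadCruzada_alt mensajes N M flag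
instance (mensajes : List (List Int)) (N : Int) (M : Int) (flag : Int) (out : List (List Int)) : Decidable (Spec_metodoParidadCruzada mensajes N M flag out) := by unfold Spec_metodoParidadCruzada; infer_instance

-- ===== CLAIM (what is proved, stated in full; the proofs are below) =====
def Claim_equal_metodoParidadCruzada : Prop := ∀ (mensajes : List (List Int)) (N : Int) (M : Int) (flag : Int), Dom_metodoParidadCruzada mensajes N M flag → Pre_metodoParidadCruzada mensajes N M flag → Spec_metodoParidadCruzada mensajes N M flag (metodoParidadCruzada mensajes N M flag)

-- ===== LEMMAS AND PROOFS =====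

-- 0 if c % 2 == 0 else 1  IS  c % 2 (Python's % 2 is 0 or 1)
theorem pv_if_mod_two (c : Int) :
    (if PySem.Int.mod c 2 == 0 then (0 : Int) else 1) = PySem.Int.mod c 2 := by
  have h0 := PySem.Int.mod_nonneg c (b := 2) (by norm_num)
  have h1 := PySem.Int.mod_lt c (b := 2) (by norm_num)
  simp only [beq_iff_eq]
  split_ifs with h <;> omega

def pvF (fila : List Int) : List Int := fila ++ [PySem.Int.mod fila.sum 2]

theorem pv_range (N : Int) : PySem.List.pyRange 0 N 1 = (List.range N.toNat).map (fun (k : Nat) => (k : Int)) := by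
  rw [PySem.List.pyRange_one]
  simp

-- A's row loop
theorem pv_loopA (P : List (List Int)) (n : Nat) (h : n ≤ P.length) :
    (List.range n).foldl
      (fun p (k : Nat) => PySem.List.pySetD p (k : Int) (pvF (PySem.List.pyGetD p (k : Int) ([] : List Int)))) P
    = (P.take n).map pvF ++ P.drop n := by
  induction n with
  | zero => simp
  | succ n ih =>
    rw [List.range_succ, List.foldl_append, ih (by omega)]
    have hn : n < P.length := by omega
    have hpre : ((P.take n).map pvF).length = n := by simp [List.length_take]; omega
    have hget : PySem.List.pyGetD ((P.take n).map pvF ++ P.drop n) (n : Int) ([] : List Int) = P[n] := by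
      simp only [PySem.List.pyGetD_natCast]
      rw [List.getD_eq_getElem?_getD, List.getElem?_append_right (by omega), hpre]
      simp [List.getElem?_drop, List.getElem?_eq_getElem hn]
    simp only [List.foldl_cons, List.foldl_nil, hget, PySem.List.pySetD_natCast]
    rw [List.set_append_right _ _ (by omega), hpre, Nat.sub_self,
        List.drop_eq_getElem_cons hn, List.set_cons_zero]
    rw [show List.take (n+1) P = List.take n P ++ [P[n]] from by
      rw [List.take_add_one, List.getElem?_eq_getElem hn]; simp]
    simp only [List.map_append, List.map_cons, List.map_nil, List.append_assoc,
      List.cons_append, List.nil_append]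

-- B's fused loop: same row updates, plus the running column accumulators
theorem pv_loopB (P : List (List Int)) (c0 : List Int) (n : Nat) (h : n ≤ P.length) :
    (List.range n).foldl
      (fun (st : List (List Int) × List Int) (k : Nat) =>
        (PySem.List.pySetD st.1 (k : Int) (pvF (PySem.List.pyGetD st.1 (k : Int) ([] : List Int))),
         List.zipWith (fun c v => c + v) st.2 (pvF (PySem.List.pyGetD st.1 (k : Int) ([] : List Int)))))
      (P, c0)
    = ((P.take n).map pvF ++ P.drop n,
       ((P.take n).map pvF).foldl (fun c r => List.zipWith (fun c v => c + v) c r) c0) := by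
  induction n with
  | zero => simp
  | succ n ih =>
    rw [List.range_succ, List.foldl_append, ih (by omega)]
    have hn : n < P.length := by omega
    have hpre : ((P.take n).map pvF).length = n := by simp [List.length_take]; omega
    have hget : PySem.List.pyGetD ((P.take n).map pvF ++ P.drop n) (n : Int) ([] : List Int) = P[n] := by
      simp only [PySem.List.pyGetD_natCast]
      rw [List.getD_eq_getElem?_getD, List.getElem?_append_right (by omega), hpre]
      simp [List.getElem?_drop, List.getElem?_eq_getElem hn]
    have htake : List.take (n+1) P = List.take n P ++ [P[n]] := by
      rw [List.take_add_one, List.getElem?_eq_getElem hn]; simp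
    simp only [List.foldl_cons, List.foldl_nil, hget, PySem.List.pySetD_natCast]
    refine Prod.ext ?_ ?_
    · rw [List.set_append_right _ _ (by omega), hpre, Nat.sub_self,
          List.drop_eq_getElem_cons hn, List.set_cons_zero, htake]
      simp only [List.map_append, List.map_cons, List.map_nil, List.append_assoc,
        List.cons_append, List.nil_append]
    · rw [htake]
      simp only [List.map_append, List.map_cons, List.map_nil, List.foldl_append,
        List.foldl_cons, List.foldl_nil]

-- folding rows into column accumulators = per-column sums
theorem pv_cols (rows : List (List Int)) (c : List Int)
    (h : ∀ r ∈ rows, c.length ≤ r.length) :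
    rows.foldl (fun c r => List.zipWith (fun c v => c + v) c r) c
    = (List.range c.length).map (fun (j : Nat) => c.getD j 0 + (rows.map (fun r => r.getD j 0)).sum) := by
  induction rows generalizing c with
  | nil =>
    apply List.ext_getElem (by simp)
    intro j h1 h2
    simp only [List.foldl_nil] at h1 ⊢
    rw [List.getElem_map, List.getElem_range, List.getD_eq_getElem _ _ (by simpa using h1)]
    simp
  | cons r rows ih =>
    have hr : c.length ≤ r.length := h r List.mem_cons_self
    have hcr : (List.zipWith (fun c v => c + v) c r).length = c.length := by
      simp [List.length_zipWith]; omega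
    rw [List.foldl_cons, ih _ (fun r' hr' => by rw [hcr]; exact h r' (List.mem_cons_of_mem _ hr')), hcr]
    apply List.map_congr_left
    intro j hj
    have hjc : j < c.length := List.mem_range.mp hj
    have hjr : j < r.length := by omega
    rw [List.getD_eq_getElem _ _ (by rw [hcr]; exact hjc), List.getElem_zipWith,
        List.getD_eq_getElem _ _ hjc, List.map_cons, List.sum_cons,
        List.getD_eq_getElem _ _ hjr]
    ring

-- assembled equality over an arbitrary copied matrix P
theorem pv_goal (P : List (List Int)) (N M : Int)
    (hlen : N.toNat ≤ P.length)
    (hrow : ∀ x ∈ P.take N.toNat, M ≤ (x.length : Int)) :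
    ((PySem.List.pyRange 0 N 1).foldl
        (fun p i => PySem.List.pySetD p i
          (PySem.List.pyGetD p i ([] : List Int) ++
            [PySem.Int.mod (PySem.List.pyGetD p i ([] : List Int)).sum 2])) P)
      ++ [(PySem.List.pyRange 0 (M + 1) 1).map
          (fun j => PySem.Int.mod ((PySem.List.pyRange 0 N 1).map
            (fun i => PySem.List.pyGetD
              (PySem.List.pyGetD ((PySem.List.pyRange 0 N 1).foldl
                (fun p i => PySem.List.pySetD p i
                  (PySem.List.pyGetD p i ([] : List Int) ++
                    [PySem.Int.mod (PySem.List.pyGetD p i ([] : List Int)).sum 2])) P)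
                i ([] : List Int)) j (0 : Int))).sum 2)]
    = ((PySem.List.pyRange 0 N 1).foldl
        (fun (st : List (List Int) × List Int) i =>
          (PySem.List.pySetD st.1 i
            (PySem.List.pyGetD st.1 i ([] : List Int) ++
              [PySem.Int.mod (PySem.List.pyGetD st.1 i ([] : List Int)).sum 2]),
           List.zipWith (fun c v => c + v) st.2
            (PySem.List.pyGetD st.1 i ([] : List Int) ++
              [PySem.Int.mod (PySem.List.pyGetD st.1 i ([] : List Int)).sum 2])))
        (P, List.replicate (M + 1).toNat (0 : Int))).1
      ++ [((PySem.List.pyRange 0 N 1).foldl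
        (fun (st : List (List Int) × List Int) i =>
          (PySem.List.pySetD st.1 i
            (PySem.List.pyGetD st.1 i ([] : List Int) ++
              [PySem.Int.mod (PySem.List.pyGetD st.1 i ([] : List Int)).sum 2]),
           List.zipWith (fun c v => c + v) st.2
            (PySem.List.pyGetD st.1 i ([] : List Int) ++
              [PySem.Int.mod (PySem.List.pyGetD st.1 i ([] : List Int)).sum 2])))
        (P, List.replicate (M + 1).toNat (0 : Int))).2.map
          (fun c => PySem.Int.mod c 2)] := by
  have hloopA : (List.range N.toNat).foldl
      (fun p (k : Nat) => PySem.List.pySetD p (k : Int)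
        (PySem.List.pyGetD p (k : Int) ([] : List Int) ++
          [PySem.Int.mod (PySem.List.pyGetD p (k : Int) ([] : List Int)).sum 2])) P
      = (P.take N.toNat).map (fun r => r ++ [PySem.Int.mod r.sum 2]) ++ P.drop N.toNat := by
    have := pv_loopA P N.toNat hlen
    simp only [pvF] at this
    exact this
  have hloopB : (List.range N.toNat).foldl
      (fun (st : List (List Int) × List Int) (k : Nat) =>
        (PySem.List.pySetD st.1 (k : Int)
          (PySem.List.pyGetD st.1 (k : Int) ([] : List Int) ++
            [PySem.Int.mod (PySem.List.pyGetD st.1 (k : Int) ([] : List Int)).sum 2]),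
         List.zipWith (fun c v => c + v) st.2
          (PySem.List.pyGetD st.1 (k : Int) ([] : List Int) ++
            [PySem.Int.mod (PySem.List.pyGetD st.1 (k : Int) ([] : List Int)).sum 2])))
      (P, List.replicate (M + 1).toNat (0 : Int))
      = ((P.take N.toNat).map (fun r => r ++ [PySem.Int.mod r.sum 2]) ++ P.drop N.toNat,
         ((P.take N.toNat).map (fun r => r ++ [PySem.Int.mod r.sum 2])).foldl
           (fun c r => List.zipWith (fun c v => c + v) c r) (List.replicate (M + 1).toNat (0 : Int))) := by
    have := pv_loopB P (List.replicate (M + 1).toNat (0 : Int)) N.toNat hlen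
    simp only [pvF] at this
    exact this
  simp only [pv_range, List.foldl_map, hloopA, hloopB]
  congr 2
  have hrowslen : (List.map (fun r => r ++ [PySem.Int.mod r.sum 2]) (List.take N.toNat P)).length
      = N.toNat := by
    simp [List.length_take]; omega
  have hcols : ∀ r ∈ List.map (fun r => r ++ [PySem.Int.mod r.sum 2]) (List.take N.toNat P),
      (List.replicate (M + 1).toNat (0 : Int)).length ≤ r.length := by
    intro r hr
    obtain ⟨fila, hfl, rfl⟩ := List.mem_map.mp hr
    have := hrow fila hfl
    simp only [List.length_replicate, List.length_append, List.length_cons, List.length_nil]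
    omega
  have hc := pv_cols (List.map (fun r => r ++ [PySem.Int.mod r.sum 2]) (List.take N.toNat P))
    (List.replicate (M + 1).toNat 0) hcols
  rw [List.foldl_map] at hc
  rw [hc]
  simp only [List.map_map, List.length_replicate]
  apply List.map_congr_left
  intro j hj
  have hjm : j < (M + 1).toNat := List.mem_range.mp hj
  simp only [Function.comp_apply, PySem.List.pyGetD_natCast,
    List.getD_replicate _ hjm, zero_add]
  congr 1
  refine congrArg (List.sum (α := Int)) ?_
  apply List.ext_getElem (by simp; omega)
  intro k hk1 hk2
  have hkn : k < N.toNat := by simpa using hk1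
  simp only [List.getElem_map, List.getElem_range, Function.comp_apply,
    PySem.List.pyGetD_natCast]
  have hrq : (List.map (fun r => r ++ [PySem.Int.mod r.sum 2]) (List.take N.toNat P)).getD k
      ([] : List Int) = (List.take N.toNat P)[k]'(by simp [List.length_take]; omega) ++
        [PySem.Int.mod ((List.take N.toNat P)[k]'(by simp [List.length_take]; omega)).sum 2] := by
    rw [List.getD_eq_getElem _ _ (by omega), List.getElem_map]
  rw [List.getD_append _ _ _ _ (by omega), hrq]

theorem metodoParidadCruzada_spec : Claim_equal_metodoParidadCruzada := by
  intro mensajes N M flag _ hPre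
  obtain ⟨h1, h2⟩ := hPre
  unfold Spec_metodoParidadCruzada metodoParidadCruzada metodoParidadCruzada_alt pvCopyA
  simp only [pv_if_mod_two, List.map_id']
  by_cases hf : (flag == 0) = true
  · simp only [hf, if_true]
    exact pv_goal mensajes N M (by omega) (fun x hx => h2 x hx)
  · simp only [hf, Bool.false_eq_true, if_false]
    refine pv_goal _ N M ?_ ?_
    · rcases (by omega : 0 ≤ N ∨ N < 0) with hN | hN
      · rw [List.length_map, PySem.List.slice_to mensajes hN, List.length_take]
        omega
      · have h0 : N.toNat = 0 := by omega
        omega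
    · intro x hx
      rcases (by omega : 0 ≤ N ∨ N < 0) with hN | hN
      · rw [PySem.List.slice_to mensajes hN] at hx
        have hx' := List.mem_of_mem_take hx
        obtain ⟨fila, hfila, rfl⟩ := List.mem_map.mp hx'
        have hM := h2 fila hfila
        rcases (by omega : 0 ≤ M ∨ M < 0) with hM0 | hM0
        · rw [PySem.List.slice_to fila hM0, List.length_take]
          omega
        · omega
      · have h0 : N.toNat = 0 := by omega
        rw [h0] at hx
        simp at hx
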